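-- pv_equiv track=rewrite | github.com/WiuYuan/pmcad | src/pmcad/interpro_judge.py | match_llm_output_to_hit
-- ===== SOURCE A (Python) =====
-- def normalize(s: str):
--     return s.strip().lower().replace('"', "").replace("'", "")
--
-- def match_llm_output_to_hit(llm_output: str, hits: list):
--     out = normalize(llm_output)
--
--     if out == "none":
--         return None
--
--     for h in hits:
--         interpro_id = h.get("id")
--         if interpro_id and normalize(interpro_id) == out:
--             return h
--
--     # 再尝试按 name 匹配（兜底）
--     for h in hits:
--         name = h.get("name")
--         if name and normalize(name) == out:
--             return h
--
--     return None
-- ===== SOURCE B (Python) =====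
-- def normalize(s: str):
--     return s.strip().lower().replace('"', "").replace("'", "")
--
-- def rank(out, h):
--     v = h.get("id")
--     if v and normalize(v) == out:
--         return 0
--     v = h.get("name")
--     if v and normalize(v) == out:
--         return 1
--     return None
--
-- def match_llm_output_to_hit(llm_output: str, hits: list):
--     out = normalize(llm_output)
--     if out == "none":
--         return None
--     best = None  # (priority, hit); lower priority wins, earlier hit wins ties
--     for h in hits:
--         p = rank(out, h)
--         if p is not None and (best is None or p < best[0]):
--             best = (p, h)
--     return None if best is None else best[1]
-- ===== Notes on version B (the rewrite author's own statement) =====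
-- stated objective: alternative
-- what changed: Replaces A's two sequential find-first scans (id pass, then name pass) by a single fold that ranks every hit (0 = id match, 1 = name match) and keeps the minimum-rank earliest hit in an accumulator, with no early return.
import Mathlib
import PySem

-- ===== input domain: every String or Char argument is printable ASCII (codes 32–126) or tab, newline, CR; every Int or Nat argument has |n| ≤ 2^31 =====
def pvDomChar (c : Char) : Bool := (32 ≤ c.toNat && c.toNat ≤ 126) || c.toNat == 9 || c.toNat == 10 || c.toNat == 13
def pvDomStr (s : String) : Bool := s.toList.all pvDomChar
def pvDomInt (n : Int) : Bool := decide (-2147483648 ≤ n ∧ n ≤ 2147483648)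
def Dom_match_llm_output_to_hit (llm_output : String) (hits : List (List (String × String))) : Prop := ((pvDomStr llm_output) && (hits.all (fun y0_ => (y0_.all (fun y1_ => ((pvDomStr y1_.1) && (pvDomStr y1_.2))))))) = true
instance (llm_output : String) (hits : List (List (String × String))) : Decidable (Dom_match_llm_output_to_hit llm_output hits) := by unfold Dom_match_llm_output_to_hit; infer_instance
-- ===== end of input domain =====

-- B replaces A's two sequential find-first scans (id pass then name pass) by a single fold that
-- ranks each hit (0 = id match, 1 = name match) and keeps the minimum-rank earliest hit ("alternative").

-- shared helper: the module-level normalize(s)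
def pvNormalize (s : String) : String :=
  PySem.Str.replace (PySem.Str.replace (PySem.Str.lower (PySem.Str.strip s)) "\"" "") "'" ""

-- ===== PORT A =====
-- h.get(k): first match in the association-list image of the dict
def pvGet (h : List (String × String)) (k : String) : Option String :=
  match h with
  | [] => none
  | (a, b) :: t => if a == k then some b else pvGet t k

-- truthiness + normalize test: `v and normalize(v) == out`
def pvKeyMatches (out : String) (v : Option String) : Bool :=
  match v with
  | some s => s != "" && pvNormalize s == out
  | none => false

-- first loop of A: match by "id"
def pvFindId (out : String) : List (List (String × String)) → Option (List (String × String))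
  | [] => none
  | h :: t => if pvKeyMatches out (pvGet h "id") then some h else pvFindId out t

-- second loop of A: match by "name"
def pvFindName (out : String) : List (List (String × String)) → Option (List (String × String))
  | [] => none
  | h :: t => if pvKeyMatches out (pvGet h "name") then some h else pvFindName out t

def match_llm_output_to_hit (llm_output : String) (hits : List (List (String × String))) : Option (List (String × String)) :=
  let out := pvNormalize llm_output
  if out == "none" then none
  else
    match pvFindId out hits with
    | some h => some h
    | none => pvFindName out hits

-- ===== PORT B =====
-- rank(out, h): 0 for an id match, 1 for a name match, none otherwise
def pvRank (out : String) (h : List (String × String)) : Option Nat :=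
  match (PySem.Dict.mk h).get? "id" with
  | some s =>
    if s != "" && pvNormalize s == out then some 0
    else
      match (PySem.Dict.mk h).get? "name" with
      | some s' => if s' != "" && pvNormalize s' == out then some 1 else none
      | none => none
  | none =>
    match (PySem.Dict.mk h).get? "name" with
    | some s' => if s' != "" && pvNormalize s' == out then some 1 else none
    | none => none

-- the loop body: keep the best (priority, hit) so far
def pvStep (out : String) (best : Option (Nat × List (String × String)))
    (h : List (String × String)) : Option (Nat × List (String × String)) :=
  match pvRank out h with
  | none => best
  | some p =>
    match best with
    | none => some (p, h)
    | some (q, g) => if p < q then some (p, h) else some (q, g)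

def match_llm_output_to_hit_alt (llm_output : String) (hits : List (List (String × String))) : Option (List (String × String)) :=
  let out := pvNormalize llm_output
  if out == "none" then none
  else
    match hits.foldl (pvStep out) none with
    | none => none
    | some (_, h) => some h

-- ===== PRECONDITION & SPEC =====
def Spec_match_llm_output_to_hit (llm_output : String) (hits : List (List (String × String))) (out : Option (List (String × String))) : Prop := out = match_llm_output_to_hit_alt llm_output hits
instance (llm_output : String) (hits : List (List (String × String))) (out : Option (List (String × String))) : Decidable (Spec_match_llm_output_to_hit llm_output hits out) := by unfold Spec_match_llm_output_to_hit; infer_instance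

-- ===== CLAIM =====
def Claim_equal_match_llm_output_to_hit : Prop := ∀ (llm_output : String) (hits : List (List (String × String))), Dom_match_llm_output_to_hit llm_output hits → Spec_match_llm_output_to_hit llm_output hits (match_llm_output_to_hit llm_output hits)

-- ===== LEMMAS AND PROOFS =====
-- B's dict lookup agrees with A's hand-rolled association-list get
theorem pvGet_eq_dictGet (h : List (String × String)) (k : String) :
    (PySem.Dict.mk h).get? k = pvGet h k := by
  induction h with
  | nil => simp [pvGet, PySem.Dict.get?]
  | cons p t ih =>
    obtain ⟨a, b⟩ := p
    rw [PySem.Dict.get?_mk_cons]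
    simp [pvGet, ih]

-- pvRank in terms of A's match tests
theorem pvRank_eq (out : String) (h : List (String × String)) :
    pvRank out h =
      (if pvKeyMatches out (pvGet h "id") then some 0
       else if pvKeyMatches out (pvGet h "name") then some 1 else none) := by
  unfold pvRank
  rw [pvGet_eq_dictGet, pvGet_eq_dictGet]
  cases pvGet h "id" with
  | none => cases pvGet h "name" <;> simp [pvKeyMatches]
  | some s =>
    by_cases hs : (s != "" && pvNormalize s == out) = true
    · simp [pvKeyMatches, hs]
    · cases pvGet h "name" <;> simp [pvKeyMatches, hs]

-- an accumulated id match (rank 0) is never replaced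
theorem foldl_acc0 (out : String) (l : List (List (String × String))) (g : List (String × String)) :
    l.foldl (pvStep out) (some (0, g)) = some (0, g) := by
  induction l with
  | nil => rfl
  | cons h t ih =>
    have : pvStep out (some (0, g)) h = some (0, g) := by
      rw [pvStep, pvRank_eq]; split_ifs <;> simp
    simp [List.foldl_cons, this, ih]

-- an accumulated name match (rank 1) survives unless an id match appears
theorem foldl_acc1 (out : String) (l : List (List (String × String))) (g : List (String × String)) :
    l.foldl (pvStep out) (some (1, g)) =
      (match pvFindId out l with
       | some h => some (0, h)
       | none => some (1, g)) := by
  induction l with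
  | nil => rfl
  | cons h t ih =>
    by_cases hid : pvKeyMatches out (pvGet h "id")
    · have : pvStep out (some (1, g)) h = some (0, h) := by
        rw [pvStep, pvRank_eq]; simp [hid]
      simp [List.foldl_cons, this, foldl_acc0, pvFindId, hid]
    · have : pvStep out (some (1, g)) h = some (1, g) := by
        rw [pvStep, pvRank_eq]; split_ifs <;> simp_all
      simp [List.foldl_cons, this, ih, pvFindId, hid]

-- from an empty accumulator the fold computes: first id match, else first name match
theorem foldl_none (out : String) (l : List (List (String × String))) :
    l.foldl (pvStep out) none =
      (match pvFindId out l with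
       | some h => some (0, h)
       | none =>
         match pvFindName out l with
         | some h => some (1, h)
         | none => none) := by
  induction l with
  | nil => rfl
  | cons h t ih =>
    by_cases hid : pvKeyMatches out (pvGet h "id")
    · have : pvStep out none h = some (0, h) := by
        rw [pvStep, pvRank_eq]; simp [hid]
      simp [List.foldl_cons, this, foldl_acc0, pvFindId, hid]
    · by_cases hn : pvKeyMatches out (pvGet h "name")
      · have : pvStep out none h = some (1, h) := by
          rw [pvStep, pvRank_eq]; simp [hid, hn]
        simp [List.foldl_cons, this, foldl_acc1, pvFindId, pvFindName, hid, hn]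
      · have : pvStep out none h = none := by
          rw [pvStep, pvRank_eq]; simp [hid, hn]
        simp [List.foldl_cons, this, ih, pvFindId, pvFindName, hid, hn]

-- ===== VERDICT =====
theorem match_llm_output_to_hit_spec : Claim_equal_match_llm_output_to_hit := by
  intro llm_output hits _
  unfold Spec_match_llm_output_to_hit match_llm_output_to_hit match_llm_output_to_hit_alt
  by_cases hn : pvNormalize llm_output == "none"
  · simp [hn]
  · simp only [hn, if_false, Bool.false_eq_true]
    rw [foldl_none]
    cases pvFindId (pvNormalize llm_output) hits with
    | some h => rfl
    | none => cases pvFindName (pvNormalize llm_output) hits <;> rfl
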